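-- pv_equiv track=rewrite | github.com/Sh-OV/Study_Python | Seminar_6/Example_18.py | adding_spaces_text
-- ===== SOURCE A (Python) =====
-- def adding_spaces_text (str_text):      # функция добавления пробелов
--     spaces = ''
--     for i in str_text:
--         if i.isdigit():
--             spaces += i
--         else:
--             spaces += ' ' + i + ' '
--     spaces = spaces.split()
--     return  spaces
-- ===== SOURCE B (Python) =====
-- def adding_spaces_text(str_text):
--     # One pass: group consecutive digits into one token, emit each non-digit
--     # non-whitespace char as its own token; no intermediate string + split().
--     tokens = []
--     buf = ''
--     for ch in str_text:
--         if ch.isdigit():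
--             buf += ch
--         else:
--             if buf:
--                 tokens.append(buf)
--                 buf = ''
--             if not ch.isspace():
--                 tokens.append(ch)
--     if buf:
--         tokens.append(buf)
--     return tokens
-- ===== Notes on version B (the rewrite author's own statement) =====
-- stated objective: faster
-- what changed: B builds the token list directly in one pass with a digit-run buffer instead of concatenating a space-delimited string character by character and then splitting it.
import Mathlib
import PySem

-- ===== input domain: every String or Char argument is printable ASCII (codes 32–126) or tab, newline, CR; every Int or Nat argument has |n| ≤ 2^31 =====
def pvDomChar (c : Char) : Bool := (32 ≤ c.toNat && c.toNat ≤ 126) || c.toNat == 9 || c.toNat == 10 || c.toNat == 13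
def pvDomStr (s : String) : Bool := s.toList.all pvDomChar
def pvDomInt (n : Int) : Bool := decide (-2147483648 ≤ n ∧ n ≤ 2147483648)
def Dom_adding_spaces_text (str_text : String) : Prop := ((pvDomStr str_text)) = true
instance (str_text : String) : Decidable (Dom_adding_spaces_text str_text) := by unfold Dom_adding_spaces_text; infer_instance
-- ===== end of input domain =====

-- B replaces A's "concatenate a space-delimited string, then split()" with a single
-- pass that groups digit runs in a buffer and appends tokens directly (objective: faster).

-- ===== PORT A =====
-- the growing Python str 'spaces' is carried as its List Char (concatenation = ++)
def adding_spaces_text (str_text : String) : List String :=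
  let spaces : List Char :=
    str_text.toList.foldl
      (fun acc i => if PySem.Chars.isdigit i then acc ++ [i] else acc ++ ([' '] ++ [i] ++ [' '])) []
  PySem.Str.split₀ (String.ofList spaces)

-- ===== PORT B =====
-- the loop of Source B: buf = current digit run, toks = tokens appended so far
def pvAltGo (cs : List Char) (buf : List Char) (toks : List String) : List String :=
  match cs with
  | [] => toks ++ (if buf.isEmpty then [] else [String.ofList buf])
  | c :: rest =>
      if PySem.Chars.isdigit c then pvAltGo rest (buf ++ [c]) toks
      else pvAltGo rest []
        (toks ++ (if buf.isEmpty then [] else [String.ofList buf]) ++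
          (if PySem.Chars.isspace c then [] else [String.ofList [c]]))

def adding_spaces_text_alt (str_text : String) : List String :=
  pvAltGo str_text.toList [] []

-- ===== PRECONDITION & SPEC =====
def Spec_adding_spaces_text (str_text : String) (out : List String) : Prop := out = adding_spaces_text_alt str_text
instance (str_text : String) (out : List String) : Decidable (Spec_adding_spaces_text str_text out) := by unfold Spec_adding_spaces_text; infer_instance

-- ===== CLAIM (what is proved, stated in full; the proofs are below) =====
def Claim_equal_adding_spaces_text : Prop := ∀ (str_text : String), Dom_adding_spaces_text str_text → Spec_adding_spaces_text str_text (adding_spaces_text str_text)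

-- ===== LEMMAS AND PROOFS =====

-- proof-side: the token words (as char lists) that B emits from cs starting with buffer buf
def pvWords (cs : List Char) (buf : List Char) : List (List Char) :=
  match cs with
  | [] => if buf.isEmpty then [] else [buf]
  | c :: rest =>
      if PySem.Chars.isdigit c then pvWords rest (buf ++ [c])
      else (if buf.isEmpty then [] else [buf]) ++
           (if PySem.Chars.isspace c then [] else [[c]]) ++ pvWords rest []

theorem pvAltGo_eq_words (cs : List Char) (buf : List Char) (toks : List String) :
    pvAltGo cs buf toks = toks ++ (pvWords cs buf).map String.ofList := by
  induction cs generalizing buf toks with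
  | nil => simp [pvAltGo, pvWords]; split_ifs <;> simp
  | cons c rest ih =>
      simp only [pvAltGo, pvWords]
      split_ifs <;> simp [ih]

theorem pvIsdigit_not_isspace (c : Char) (h : PySem.Chars.isdigit c = true) :
    PySem.Chars.isspace c = false := by
  simp only [PySem.Chars.isdigit, Bool.and_eq_true, decide_eq_true_eq] at h
  have h0 : 48 ≤ c.toNat := h.1
  have h9 : c.toNat ≤ 57 := h.2
  simp only [PySem.Chars.isspace, Bool.or_eq_false_iff, Bool.and_eq_false_iff,
    decide_eq_false_iff_not]
  omega

theorem pvSpace_isspace : PySem.Chars.isspace ' ' = true := by decide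

-- the core correspondence: split₀.go over A's delimited string = B's direct emission
theorem pvGo_build (cs : List Char) (buf : List Char) (acc : List (List Char)) :
    PySem.Chars.split₀.go
      (cs.flatMap (fun c => if PySem.Chars.isdigit c then [c] else [' ', c, ' ']))
      buf.reverse acc
    = acc.reverse ++ pvWords cs buf := by
  induction cs generalizing buf acc with
  | nil =>
      rw [PySem.Chars.split₀.go.eq_def]
      simp only [List.flatMap_nil, pvWords]
      by_cases h : buf = [] <;> simp [h, List.isEmpty_iff]
  | cons c rest ih =>
      by_cases hd : PySem.Chars.isdigit c = true
      · simp only [List.flatMap_cons, hd, if_pos, pvWords, List.singleton_append]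
        rw [PySem.Chars.split₀.go.eq_def]
        dsimp only
        simp only [pvIsdigit_not_isspace c hd, Bool.false_eq_true, if_false]
        have e : c :: buf.reverse = (buf ++ [c]).reverse := by simp
        rw [e, ih]
      · simp only [List.flatMap_cons, if_neg hd, pvWords, List.cons_append, List.nil_append]
        -- first delimiter ' '
        rw [PySem.Chars.split₀.go.eq_def]
        dsimp only
        simp only [pvSpace_isspace, if_pos]
        by_cases hb : buf = []
        · subst hb
          simp only [List.reverse_nil, List.isEmpty_nil, if_pos]
          rw [PySem.Chars.split₀.go.eq_def]
          dsimp only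
          by_cases hs : PySem.Chars.isspace c = true
          · simp only [hs, if_pos, List.isEmpty_nil]
            rw [PySem.Chars.split₀.go.eq_def]
            dsimp only
            simp only [pvSpace_isspace, if_pos, List.isEmpty_nil, if_pos]
            have := ih [] acc
            simp only [List.reverse_nil] at this
            rw [this]; simp [hs]
          · simp only [hs, if_neg, Bool.not_eq_true, if_false]
            rw [PySem.Chars.split₀.go.eq_def]
            dsimp only
            simp only [pvSpace_isspace, if_pos, List.isEmpty_cons,
              if_neg (by simp : ¬ (false = true))]
            have := ih [] ([c].reverse :: acc)
            simp only [List.reverse_nil] at this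
            rw [this]; simp [hs]
        · have hb2 : buf.reverse.isEmpty = false := by simp [List.isEmpty_iff, hb]
          simp only [hb2, if_neg (by simp : ¬ (false = true)), List.reverse_reverse]
          rw [PySem.Chars.split₀.go.eq_def]
          dsimp only
          by_cases hs : PySem.Chars.isspace c = true
          · simp only [hs, if_pos, List.isEmpty_nil, if_pos]
            rw [PySem.Chars.split₀.go.eq_def]
            dsimp only
            simp only [pvSpace_isspace, if_pos, List.isEmpty_nil, if_pos]
            have := ih [] (buf :: acc)
            simp only [List.reverse_nil] at this
            rw [this]; simp [hs, hb, List.isEmpty_iff]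
          · simp only [hs, if_neg, Bool.not_eq_true, if_false]
            rw [PySem.Chars.split₀.go.eq_def]
            dsimp only
            simp only [pvSpace_isspace, if_pos, List.isEmpty_cons,
              if_neg (by simp : ¬ (false = true))]
            have := ih [] ([c].reverse :: (buf :: acc))
            simp only [List.reverse_nil] at this
            rw [this]; simp [hs, hb, List.isEmpty_iff]

-- ===== VERDICT (by name: the statement is the Claim_ definition above) =====
theorem adding_spaces_text_spec : Claim_equal_adding_spaces_text := by
  intro s _
  unfold Spec_adding_spaces_text adding_spaces_text adding_spaces_text_alt
  rw [pvAltGo_eq_words]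
  simp only [PySem.Str.split₀, PySem.Chars.split₀, String.toList_ofList, List.nil_append,
    List.cons_append, List.singleton_append]
  have hfun : (fun (acc : List Char) i =>
        if PySem.Chars.isdigit i = true then acc ++ [i] else acc ++ [' ', i, ' '])
      = (fun acc i => acc ++ (if PySem.Chars.isdigit i = true then [i] else [' ', i, ' '])) := by
    funext acc i; split <;> rfl
  rw [hfun, PySem.List.foldl_append_eq_flatMap]
  have h := pvGo_build s.toList [] []
  simp only [List.reverse_nil, List.nil_append] at h
  rw [List.nil_append, h]
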